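-- pv_equiv track=rewrite | github.com/M1nseoPark/CodingtestStudy | 풍선 터뜨리기.py | solution
-- ===== SOURCE A (Python) =====
-- def solution(a):
--     result = [False for _ in range(len(a))]
--     lmin, rmin = float('inf'), float('inf')
--
--     for i in range(len(a)):
--         if a[i] < lmin:
--             lmin = a[i]
--             result[i] = True
--         if a[-1-i] < rmin:
--             rmin = a[-1-i]
--             result[-1-i] = True
--
--     answer = 0
--     for i in range(len(result)):
--         if result[i]:
--             answer += 1
--
--     return answer
-- ===== SOURCE B (Python) =====
-- def solution(a):
--     if not a:
--         return 0
--     L = 0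
--     m = None
--     for x in a:
--         if m is None or x < m:
--             m = x
--             L += 1
--     R = 0
--     m = None
--     for x in reversed(a):
--         if m is None or x < m:
--             m = x
--             R += 1
--     overlap = 1 if a.count(min(a)) == 1 else 0
--     return L + R - overlap
-- ===== Notes on version B (the rewrite author's own statement) =====
-- stated objective: alternative
-- what changed: Replaces the boolean mark array (one merged loop marking both ends plus a counting pass) by two independent running-min counting scans (forward and backward) combined by inclusion-exclusion, where the overlap term is 1 iff the global minimum occurs exactly once.
import Mathlib
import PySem

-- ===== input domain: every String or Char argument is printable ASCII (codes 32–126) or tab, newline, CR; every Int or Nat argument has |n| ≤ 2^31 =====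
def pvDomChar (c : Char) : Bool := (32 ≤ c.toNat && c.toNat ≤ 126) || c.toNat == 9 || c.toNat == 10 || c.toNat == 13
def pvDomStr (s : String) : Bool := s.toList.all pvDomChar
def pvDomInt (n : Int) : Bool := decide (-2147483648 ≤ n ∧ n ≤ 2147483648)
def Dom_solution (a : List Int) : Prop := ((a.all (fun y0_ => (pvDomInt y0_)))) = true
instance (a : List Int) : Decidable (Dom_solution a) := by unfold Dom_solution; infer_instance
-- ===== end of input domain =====

-- B replaces A's boolean mark array (one merged marking loop plus a counting pass) by two
-- independent running-min counting scans combined by inclusion-exclusion; same O(n) cost.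

-- B replaces A's boolean mark array and counting pass by two independent running-min
-- counts combined by inclusion-exclusion (overlap = 1 iff the minimum is unique); same cost.

-- `x < m` where `m` starts as float('inf') (A) / None (B): true when no minimum seen yet.
def pvLtOpt (x : Int) : Option Int → Bool
  | none => true
  | some m => decide (x < m)

-- ===== PORT A =====
-- one iteration of A's for-loop (result, lmin, rmin are the loop state)
def solutionStep (a : List Int) (st : List Bool × Option Int × Option Int) (i : Nat) :
    List Bool × Option Int × Option Int :=
  let result := st.1
  let lmin := st.2.1
  let rmin := st.2.2
  let ai := PySem.List.pyGetD a (i : Int) 0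
  let result := if pvLtOpt ai lmin then PySem.List.pySetD result (i : Int) true else result
  let lmin := if pvLtOpt ai lmin then some ai else lmin
  let aj := PySem.List.pyGetD a (-1 - (i : Int)) 0
  let result := if pvLtOpt aj rmin then PySem.List.pySetD result (-1 - (i : Int)) true else result
  let rmin := if pvLtOpt aj rmin then some aj else rmin
  (result, lmin, rmin)

def solution (a : List Int) : Int :=
  let n := a.length
  let st := (List.range n).foldl (solutionStep a) (List.replicate n false, none, none)
  st.1.foldl (fun acc b => if b then acc + 1 else acc) 0

-- ===== PORT B =====
def solution_alt (a : List Int) : Int :=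
  match a with
  | [] => 0
  | _ :: _ =>
    let L := (a.foldl (fun (p : Int × Option Int) x =>
        if pvLtOpt x p.2 then (p.1 + 1, some x) else p) (0, none)).1
    let R := (a.reverse.foldl (fun (p : Int × Option Int) x =>
        if pvLtOpt x p.2 then (p.1 + 1, some x) else p) (0, none)).1
    let overlap : Int :=
      if PySem.List.count a ((PySem.List.min? a (fun y => y)).getD 0) = 1 then 1 else 0
    L + R - overlap

-- ===== PRECONDITION & SPEC =====
def Spec_solution (a : List Int) (out : Int) : Prop := out = solution_alt a
instance (a : List Int) (out : Int) : Decidable (Spec_solution a out) := by unfold Spec_solution; infer_instance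

-- ===== CLAIM (what is proved, stated in full; the proofs are below) =====
def Claim_equal_solution : Prop := ∀ (a : List Int), Dom_solution a → Spec_solution a (solution a)

-- ===== LEMMAS AND PROOFS =====

-- `a.getD k 0` abbreviation used throughout the proofs
def pvG (a : List Int) (k : Nat) : Int := a.getD k 0

-- index k is a strict prefix minimum (abbrev so `decide` finds the instance)
abbrev PfP (a : List Int) (k : Nat) : Prop := ∀ j, j < k → pvG a k < pvG a j
-- index k is a strict suffix minimum
abbrev SfP (a : List Int) (k : Nat) : Prop := ∀ j, j < a.length → k < j → pvG a k < pvG a j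

-- minimum of a list as an Option (none for [])
def pvMinO : List Int → Option Int
  | [] => none
  | x :: xs => some (xs.foldl min x)


-- `x < foldl min` characterisation
theorem pv_lt_foldl_min (l : List Int) : ∀ (x0 y : Int),
    y < l.foldl min x0 ↔ y < x0 ∧ ∀ z ∈ l, y < z := by
  induction l with
  | nil => intro x0 y; simp
  | cons z zs ih =>
    intro x0 y
    simp only [List.foldl_cons, ih, List.mem_cons]
    constructor
    · rintro ⟨h1, h2⟩
      refine ⟨by omega, ?_⟩
      rintro w (rfl | hw)
      · omega
      · exact h2 w hw
    · rintro ⟨h1, h2⟩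
      exact ⟨by have := h2 z (Or.inl rfl); omega,
        fun w hw => h2 w (Or.inr hw)⟩

theorem pvLtOpt_pvMinO (x : Int) (l : List Int) :
    pvLtOpt x (pvMinO l) = decide (∀ y ∈ l, x < y) := by
  cases l with
  | nil => simp [pvMinO, pvLtOpt]
  | cons z zs =>
    simp only [pvMinO, pvLtOpt]
    rw [decide_eq_decide]
    rw [pv_lt_foldl_min]
    simp

theorem pv_foldl_min_min (zs : List Int) : ∀ (x z : Int),
    zs.foldl min (min x z) = min x (zs.foldl min z) := by
  induction zs with
  | nil => intro x z; simp
  | cons w ws ih =>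
    intro x z
    simp only [List.foldl_cons]
    rw [min_assoc, ih]

-- the running-min update equals the min of the extended prefix (append at the end)
theorem pvMinO_snoc (l : List Int) (x : Int) :
    (if pvLtOpt x (pvMinO l) then some x else pvMinO l) = pvMinO (l ++ [x]) := by
  cases l with
  | nil => simp [pvMinO, pvLtOpt]
  | cons z zs =>
    simp only [pvMinO, pvLtOpt, List.cons_append, List.foldl_append, List.foldl_cons,
      List.foldl_nil]
    split_ifs with h
    · simp only [decide_eq_true_eq] at h
      congr 1
      omega
    · simp only [decide_eq_true_eq] at h
      congr 1
      omega

-- the running-min update equals the min of the extended suffix (cons at the front)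
theorem pvMinO_cons (l : List Int) (x : Int) :
    (if pvLtOpt x (pvMinO l) then some x else pvMinO l) = pvMinO (x :: l) := by
  cases l with
  | nil => simp [pvMinO, pvLtOpt]
  | cons z zs =>
    simp only [pvMinO, pvLtOpt, List.foldl_cons]
    rw [pv_foldl_min_min]
    split_ifs with h
    · simp only [decide_eq_true_eq] at h
      congr 1
      omega
    · simp only [decide_eq_true_eq] at h
      congr 1
      omega

-- forward flag list: flags of B's forward scan (also = A's forward marks)
def pvPf : List Int → Option Int → List Bool
  | [], _ => []
  | x :: xs, m => pvLtOpt x m :: pvPf xs (if pvLtOpt x m then some x else m)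

theorem pvLtOpt_update (y x : Int) (m : Option Int) :
    pvLtOpt y (if pvLtOpt x m then some x else m) = (pvLtOpt y m && decide (y < x)) := by
  cases m with
  | none => simp [pvLtOpt]
  | some v =>
    simp only [pvLtOpt]
    split_ifs with h
    · simp only [pvLtOpt, decide_eq_true_eq] at *
      rw [Bool.eq_iff_iff]
      simp only [decide_eq_true_eq, Bool.and_eq_true]
      omega
    · simp only [pvLtOpt, decide_eq_true_eq] at *
      rw [Bool.eq_iff_iff]
      simp only [decide_eq_true_eq, Bool.and_eq_true]
      omega

theorem pvPf_eq_map (l : List Int) : ∀ (m : Option Int),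
    pvPf l m = (List.range l.length).map
      (fun k => pvLtOpt (pvG l k) m && decide (∀ j, j < k → pvG l k < pvG l j)) := by
  induction l with
  | nil => intro m; simp [pvPf]
  | cons x xs ih =>
    intro m
    simp only [pvPf, List.length_cons, List.range_succ_eq_map, List.map_cons, List.map_map]
    congr 1
    · simp [pvG]
    · rw [ih]
      apply List.map_congr_left
      intro k hk
      simp only [Function.comp_apply, Nat.succ_eq_add_one]
      have hg : pvG (x :: xs) (k + 1) = pvG xs k := by simp [pvG]
      have hsplit : (∀ j, j < k + 1 → pvG xs k < pvG (x :: xs) j) ↔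
          (pvG xs k < x ∧ ∀ j, j < k → pvG xs k < pvG xs j) := by
        constructor
        · intro h
          refine ⟨h 0 (by omega), fun j hj => ?_⟩
          have := h (j + 1) (by omega)
          simpa [pvG] using this
        · rintro ⟨h1, h2⟩ j hj
          cases j with
          | zero => simpa [pvG] using h1
          | succ j' => simpa [pvG] using h2 j' (by omega)
      rw [pvLtOpt_update, hg]
      rw [decide_eq_decide.mpr hsplit]
      simp only [Bool.decide_and]
      cases pvLtOpt (pvG xs k) m <;>
        cases hx : decide (pvG xs k < x) <;>
          cases hp : decide (∀ j < k, pvG xs k < pvG xs j) <;> simp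
      infer_instance

-- B's counting scan counts the true flags
theorem pv_scan_count (l : List Int) : ∀ (m : Option Int) (c : Int),
    (l.foldl (fun (p : Int × Option Int) x =>
      if pvLtOpt x p.2 then (p.1 + 1, some x) else p) (c, m)).1
      = c + ((pvPf l m).countP (fun b => b) : Int) := by
  induction l with
  | nil => intro m c; simp [pvPf]
  | cons x xs ih =>
    intro m c
    simp only [List.foldl_cons, pvPf]
    by_cases h : pvLtOpt x m
    · simp only [h, if_true, ih, List.countP_cons]
      simp
      push_cast
      omega
    · simp only [h, Bool.false_eq_true, if_false, ih, List.countP_cons]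
      simp [h]

-- counting pass over a boolean list
theorem pv_count_fold (l : List Bool) : ∀ (c : Int),
    l.foldl (fun acc b => if b then acc + 1 else acc) c = c + (l.countP (fun b => b) : Int) := by
  induction l with
  | nil => intro c; simp
  | cons b bs ih =>
    intro c
    cases b <;> simp [List.countP_cons, ih] <;> push_cast <;> omega

-- set on a map over range
theorem pv_set_map_range (n : Nat) (f : Nat → Bool) (i : Nat) (v : Bool) (hi : i < n) :
    ((List.range n).map f).set i v
      = (List.range n).map (fun k => if k = i then v else f k) := by
  apply List.ext_getElem
  · simp
  · intro k h1 h2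
    simp only [List.getElem_set, List.getElem_map, List.getElem_range]
    split_ifs with h h2 h2
    · rfl
    · exact absurd h.symm h2
    · exact absurd h2.symm h
    · rfl

theorem pvG_eq (a : List Int) (k : Nat) (h : k < a.length) : pvG a k = a[k]'h := by
  simp [pvG, List.getD_eq_getElem?_getD, List.getElem?_eq_getElem h]

theorem pv_forall_mem_take (a : List Int) (i : Nat) (hi : i ≤ a.length) (x : Int) :
    (∀ y ∈ a.take i, x < y) ↔ ∀ j, j < i → x < pvG a j := by
  constructor
  · intro h j hj
    have hj' : j < a.length := by omega
    have hjt : j < (a.take i).length := by simp; omega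
    have he : (a.take i)[j]'hjt = a[j]'hj' := List.getElem_take
    have := h _ (he ▸ List.getElem_mem hjt)
    rw [pvG_eq a j hj']
    exact this
  · intro h y hy
    obtain ⟨j, hj, rfl⟩ := List.getElem_of_mem hy
    have hj2 : j < i := by simp at hj; omega
    have hj3 : j < a.length := by omega
    have he : (a.take i)[j]'hj = a[j]'hj3 := List.getElem_take
    rw [he, ← pvG_eq a j hj3]
    exact h j hj2

theorem pv_forall_mem_drop (a : List Int) (t : Nat) (x : Int) :
    (∀ y ∈ a.drop t, x < y) ↔ ∀ j, t ≤ j → j < a.length → x < pvG a j := by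
  constructor
  · intro h j h1 h2
    have hlt : j - t < (a.drop t).length := by simp; omega
    have he : (a.drop t)[j - t]'hlt = a[t + (j - t)]'(by omega) := List.getElem_drop
    have := h _ (he ▸ List.getElem_mem hlt)
    rw [pvG_eq a j h2]
    have hj : t + (j - t) = j := by omega
    rw [show a[t + (j - t)]'(by omega) = a[j]'h2 by congr 1] at this
    exact this
  · intro h y hy
    obtain ⟨j, hj, rfl⟩ := List.getElem_of_mem hy
    have hjl : t + j < a.length := by have := hj; simp at this; omega
    have he : (a.drop t)[j]'hj = a[t + j]'hjl := List.getElem_drop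
    rw [he, ← pvG_eq a (t + j) hjl]
    exact h (t + j) (by omega) (by omega)

-- A's result list after i iterations of the loop
def pvRes (a : List Int) (i : Nat) : List Bool :=
  (List.range a.length).map
    (fun k => decide ((k < i ∧ PfP a k) ∨ (a.length - i ≤ k ∧ SfP a k)))

theorem pv_pySetD_neg (xs : List Bool) (i : Nat) (h : i < xs.length) :
    PySem.List.pySetD xs (-1 - (i : Int)) true = xs.set (xs.length - 1 - i) true := by
  have h2 : -(xs.length : Int) ≤ -1 - (i : Int) := by omega
  have h1 : ¬ (0:Int) ≤ -1 - (i : Int) := by omega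
  simp only [PySem.List.pySetD, PySem.List.pySet?, PySem.List.pyIdx?, h1, if_false, h2, if_true,
    Option.map_some, Option.getD_some]
  congr 1
  omega

theorem pv_cond_fwd (a : List Int) (i : Nat) (hi : i < a.length) :
    pvLtOpt (pvG a i) (pvMinO (a.take i)) = decide (PfP a i) := by
  rw [pvLtOpt_pvMinO, decide_eq_decide]
  exact pv_forall_mem_take a i (by omega) (pvG a i)

theorem pv_cond_bwd (a : List Int) (i : Nat) (hi : i < a.length) :
    pvLtOpt (pvG a (a.length - 1 - i)) (pvMinO (a.drop (a.length - i)))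
      = decide (SfP a (a.length - 1 - i)) := by
  rw [pvLtOpt_pvMinO, decide_eq_decide]
  rw [pv_forall_mem_drop a (a.length - i) (pvG a (a.length - 1 - i))]
  unfold SfP
  constructor
  · intro h j hj hkj
    exact h j (by omega) hj
  · intro h j h1 h2
    exact h j h2 (by omega)

theorem pv_res_fwd (a : List Int) (i : Nat) (hi : i < a.length) :
    (if decide (PfP a i) then PySem.List.pySetD (pvRes a i) (i : Int) true else pvRes a i)
      = (List.range a.length).map
          (fun k => decide ((k < i + 1 ∧ PfP a k) ∨ (a.length - i ≤ k ∧ SfP a k))) := by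
  by_cases h : PfP a i
  · rw [if_pos (decide_eq_true h)]
    simp only [PySem.List.pySetD_natCast, pvRes]
    rw [pv_set_map_range _ _ _ _ hi]
    apply List.map_congr_left
    intro k hk
    by_cases hki : k = i
    · subst hki
      rw [if_pos rfl]
      symm
      exact decide_eq_true (Or.inl (And.intro (by omega) h))
    · simp only [if_neg hki]
      rw [decide_eq_decide]
      constructor
      · rintro (⟨h1, h2⟩ | h3)
        · exact Or.inl ⟨by omega, h2⟩
        · exact Or.inr h3
      · rintro (⟨h1, h2⟩ | h3)
        · exact Or.inl ⟨by omega, h2⟩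
        · exact Or.inr h3
  · rw [if_neg (fun hc => h (of_decide_eq_true hc))]
    simp only [pvRes]
    apply List.map_congr_left
    intro k hk
    rw [decide_eq_decide]
    by_cases hki : k = i
    · subst hki
      constructor
      · rintro (⟨h1, h2⟩ | h3)
        · exact absurd h2 h
        · exact Or.inr h3
      · rintro (⟨h1, h2⟩ | h3)
        · exact absurd h2 h
        · exact Or.inr h3
    · constructor
      · rintro (⟨h1, h2⟩ | h3)
        · exact Or.inl ⟨by omega, h2⟩
        · exact Or.inr h3
      · rintro (⟨h1, h2⟩ | h3)
        · exact Or.inl ⟨by omega, h2⟩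
        · exact Or.inr h3

theorem pv_res_bwd (a : List Int) (i : Nat) (hi : i < a.length) :
    (if decide (SfP a (a.length - 1 - i)) then
        PySem.List.pySetD
          ((List.range a.length).map
            (fun k => decide ((k < i + 1 ∧ PfP a k) ∨ (a.length - i ≤ k ∧ SfP a k))))
          (-1 - (i : Int)) true
      else
        (List.range a.length).map
          (fun k => decide ((k < i + 1 ∧ PfP a k) ∨ (a.length - i ≤ k ∧ SfP a k))))
      = pvRes a (i + 1) := by
  have hlen : ((List.range a.length).map
      (fun k => decide ((k < i + 1 ∧ PfP a k) ∨ (a.length - i ≤ k ∧ SfP a k)))).length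
        = a.length := by simp
  by_cases h : SfP a (a.length - 1 - i)
  · rw [if_pos (decide_eq_true h)]
    rw [pv_pySetD_neg _ i (by omega), hlen]
    rw [pv_set_map_range _ _ _ _ (by omega)]
    apply List.map_congr_left
    intro k hk
    simp only [List.mem_range] at hk
    by_cases hki : k = a.length - 1 - i
    · subst hki
      simp only [pvRes]
      rw [if_pos trivial]
      symm
      exact decide_eq_true (Or.inr (And.intro (by omega) h))
    · simp only [if_neg hki, pvRes]
      rw [decide_eq_decide]
      constructor
      · rintro (⟨h1, h2⟩ | ⟨h3, h4⟩)
        · exact Or.inl ⟨h1, h2⟩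
        · exact Or.inr ⟨by omega, h4⟩
      · rintro (⟨h1, h2⟩ | ⟨h3, h4⟩)
        · exact Or.inl ⟨h1, h2⟩
        · exact Or.inr ⟨by omega, h4⟩
  · rw [if_neg (fun hc => h (of_decide_eq_true hc))]
    simp only [pvRes]
    apply List.map_congr_left
    intro k hk
    simp only [List.mem_range] at hk
    rw [decide_eq_decide]
    by_cases hki : k = a.length - 1 - i
    · subst hki
      constructor
      · rintro (⟨h1, h2⟩ | ⟨h3, h4⟩)
        · exact Or.inl ⟨h1, h2⟩
        · exact absurd h4 h
      · rintro (⟨h1, h2⟩ | ⟨h3, h4⟩)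
        · exact Or.inl ⟨h1, h2⟩
        · exact absurd h4 h
    · constructor
      · rintro (⟨h1, h2⟩ | ⟨h3, h4⟩)
        · exact Or.inl ⟨h1, h2⟩
        · exact Or.inr ⟨by omega, h4⟩
      · rintro (⟨h1, h2⟩ | ⟨h3, h4⟩)
        · exact Or.inl ⟨h1, h2⟩
        · exact Or.inr ⟨by omega, h4⟩

theorem pv_pyGetD_neg (xs : List Int) (i : Nat) (h : i < xs.length) :
    PySem.List.pyGetD xs (-1 - (i : Int)) 0 = pvG xs (xs.length - 1 - i) := by
  have := PySem.List.pyGetD_neg_natCast xs (i + 1) (0 : Int) (by omega) (by omega)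
  have e : -(((i : Nat) + 1 : Nat) : Int) = -1 - (i : Int) := by push_cast; ring
  rw [e] at this
  rw [this, pvG_eq xs (xs.length - 1 - i) (by omega)]
  congr 1
  omega

theorem pvA_step (a : List Int) (i : Nat) (hi : i < a.length) :
    solutionStep a (pvRes a i, pvMinO (a.take i), pvMinO (a.drop (a.length - i))) i
      = (pvRes a (i + 1), pvMinO (a.take (i + 1)), pvMinO (a.drop (a.length - (i + 1)))) := by
  have hai : PySem.List.pyGetD a ((i : Nat) : Int) 0 = pvG a i := by
    rw [PySem.List.pyGetD_natCast]; rfl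
  have haj : PySem.List.pyGetD a (-1 - (i : Int)) 0 = pvG a (a.length - 1 - i) :=
    pv_pyGetD_neg a i hi
  simp only [solutionStep, hai, haj]
  rw [pv_cond_fwd a i hi, pv_cond_bwd a i hi]
  simp only [Prod.mk.injEq]
  refine ⟨?_, ?_, ?_⟩
  · rw [pv_res_fwd a i hi, pv_res_bwd a i hi]
  · rw [← pv_cond_fwd a i hi, pvMinO_snoc]
    congr 1
    rw [List.take_succ, List.getElem?_eq_getElem hi]
    simp [pvG_eq a i hi]
  · rw [← pv_cond_bwd a i hi, pvMinO_cons]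
    congr 1
    rw [List.drop_eq_getElem_cons (show a.length - (i + 1) < a.length by omega)]
    congr 1
    · rw [pvG_eq a (a.length - 1 - i) (by omega)]
      congr 1
      omega
    · congr 1
      omega

theorem pvA_loop (a : List Int) : ∀ i, i ≤ a.length →
    (List.range i).foldl (solutionStep a) (List.replicate a.length false, none, none)
      = (pvRes a i, pvMinO (a.take i), pvMinO (a.drop (a.length - i))) := by
  intro i
  induction i with
  | zero =>
    intro _
    simp only [List.range_zero, List.foldl_nil, List.take_zero, Nat.sub_zero,
      List.drop_length, pvMinO]
    congr 1
    symm
    rw [List.eq_replicate_iff]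
    refine ⟨by simp [pvRes], ?_⟩
    intro b hb
    simp only [pvRes, List.mem_map, List.mem_range] at hb
    obtain ⟨k, hk, rfl⟩ := hb
    simp
    omega
  | succ i ih =>
    intro hle
    rw [List.range_succ, List.foldl_append, List.foldl_cons, List.foldl_nil]
    rw [ih (by omega)]
    exact pvA_step a i (by omega)

-- count of trues in a map over range
theorem pv_countP_map_range (n : Nat) (f : Nat → Bool) :
    ((List.range n).map f).countP (fun b => b) = (List.range n).countP f := by
  rw [List.countP_map]
  rfl

-- A's final value as an index count
theorem pvA_value (a : List Int) :
    solution a = (((List.range a.length).countP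
      (fun k => decide (PfP a k ∨ SfP a k)) : Nat) : Int) := by
  show (List.foldl (fun acc b => if b = true then acc + 1 else acc) 0
      ((List.range a.length).foldl (solutionStep a)
        (List.replicate a.length false, none, none)).1) = _
  rw [pvA_loop a a.length (le_refl _)]
  rw [pv_count_fold]
  simp only [pvRes, pv_countP_map_range]
  rw [Int.zero_add]
  congr 1
  apply List.countP_congr
  intro k hk
  simp only [List.mem_range] at hk
  simp only [decide_eq_true_eq]
  constructor
  · rintro (⟨_, h⟩ | ⟨_, h⟩)
    · exact Or.inl h
    · exact Or.inr h
  · rintro (h | h)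
    · exact Or.inl ⟨hk, h⟩
    · exact Or.inr ⟨by omega, h⟩

-- inclusion–exclusion for boolean counts
theorem pv_incl_excl (l : List Nat) (p q : Nat → Bool) :
    l.countP (fun k => p k || q k) + l.countP (fun k => p k && q k)
      = l.countP p + l.countP q := by
  induction l with
  | nil => simp
  | cons x xs ih =>
    simp only [List.countP_cons]
    cases hp : p x <;> cases hq : q x <;> simp <;> omega

-- reversing the index set
theorem pv_countP_rev (n : Nat) (p : Nat → Bool) :
    (List.range n).countP p = (List.range n).countP (fun k => p (n - 1 - k)) := by
  have h1 : (List.range n).reverse = (List.range n).map (fun k => n - 1 - k) := by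
    apply List.ext_getElem
    · simp
    · intro k hk1 hk2
      simp [List.getElem_reverse]
  calc (List.range n).countP p
      = (List.range n).reverse.countP p := ((List.reverse_perm _).countP_eq p).symm
    _ = ((List.range n).map (fun k => n - 1 - k)).countP p := by rw [h1]
    _ = (List.range n).countP (fun k => p (n - 1 - k)) := by rw [List.countP_map]; rfl

theorem pvG_reverse (a : List Int) (j : Nat) (hj : j < a.length) :
    pvG a.reverse j = pvG a (a.length - 1 - j) := by
  rw [pvG_eq a.reverse j (by simp; omega), pvG_eq a (a.length - 1 - j) (by omega)]
  rw [List.getElem_reverse]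

theorem pv_pf_reverse (a : List Int) (k : Nat) (hk : k < a.length) :
    PfP a.reverse (a.length - 1 - k) ↔ SfP a k := by
  unfold PfP SfP
  constructor
  · intro h j hjn hkj
    have h1 := h (a.length - 1 - j) (by omega)
    rw [pvG_reverse a (a.length - 1 - k) (by omega),
        pvG_reverse a (a.length - 1 - j) (by omega)] at h1
    rw [show a.length - 1 - (a.length - 1 - k) = k by omega,
        show a.length - 1 - (a.length - 1 - j) = j by omega] at h1
    exact h1
  · intro h j hj
    rw [pvG_reverse a (a.length - 1 - k) (by omega),
        pvG_reverse a j (by omega)]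
    rw [show a.length - 1 - (a.length - 1 - k) = k by omega]
    exact h (a.length - 1 - j) (by omega) (by omega)

-- count of a value as an index count
theorem pv_count_eq_countP_range (l : List Int) (v : Int) :
    List.count v l = (List.range l.length).countP (fun j => decide (pvG l j = v)) := by
  induction l with
  | nil => simp
  | cons x xs ih =>
    rw [List.count_cons, ih]
    simp only [List.length_cons, List.range_succ_eq_map, List.countP_cons, List.countP_map]
    have h1 : (fun j => decide (pvG (x :: xs) j = v)) ∘ Nat.succ
        = fun j => decide (pvG xs j = v) := by
      funext j
      simp [pvG]
    rw [h1]
    have h2 : pvG (x :: xs) 0 = x := rfl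
    simp only [h2]
    by_cases h : x = v
    · simp [h]
    · simp [h]

theorem pv_countP_le_one (l : List Nat) (p : Nat → Bool) (hl : l.Nodup)
    (h : ∀ x ∈ l, ∀ y ∈ l, p x → p y → x = y) : l.countP p ≤ 1 := by
  induction l with
  | nil => simp
  | cons z zs ih =>
    simp only [List.nodup_cons] at hl
    rw [List.countP_cons]
    by_cases hp : p z
    · have hzero : zs.countP p = 0 := by
        rw [List.countP_eq_zero]
        intro y hy hpy
        have := h y (List.mem_cons_of_mem _ hy) z List.mem_cons_self hpy hp
        subst this
        exact hl.1 hy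
      simp [hzero, hp]
    · simp only [hp, if_false]
      refine Nat.le_trans ?_ (ih hl.2 ?_)
      · simp
      · intro x hx y hy hpx hpy
        exact h x (List.mem_cons_of_mem _ hx) y (List.mem_cons_of_mem _ hy) hpx hpy

theorem pv_exists_two (l : List Nat) (p : Nat → Bool) (hl : l.Nodup)
    (h : 2 ≤ l.countP p) : ∃ x ∈ l, ∃ y ∈ l, x ≠ y ∧ p x ∧ p y := by
  induction l with
  | nil => simp at h
  | cons z zs ih =>
    simp only [List.nodup_cons] at hl
    rw [List.countP_cons] at h
    by_cases hp : p z
    · rw [if_pos hp] at h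
      obtain ⟨y, hy, hpy⟩ := List.countP_pos_iff.mp (show 0 < zs.countP p by omega)
      exact ⟨z, List.mem_cons_self, y, List.mem_cons_of_mem _ hy,
        fun he => hl.1 (he ▸ hy), hp, hpy⟩
    · rw [if_neg hp, Nat.add_zero] at h
      obtain ⟨x, hx, y, hy, hxy, hpx, hpy⟩ := ih hl.2 h
      exact ⟨x, List.mem_cons_of_mem _ hx, y, List.mem_cons_of_mem _ hy, hxy, hpx, hpy⟩

-- an index satisfying both PfP and SfP is unique
theorem pv_two_le_countP (l : List Nat) (p : Nat → Bool) (hl : l.Nodup)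
    (x y : Nat) (hx : x ∈ l) (hy : y ∈ l) (hxy : x ≠ y) (hpx : p x) (hpy : p y) :
    2 ≤ l.countP p := by
  induction l with
  | nil => simp at hx
  | cons z zs ih =>
    simp only [List.nodup_cons] at hl
    rw [List.countP_cons]
    rcases List.mem_cons.mp hx with rfl | hx'
    · rw [if_pos hpx]
      have hy' : y ∈ zs := by
        rcases List.mem_cons.mp hy with rfl | h
        · exact absurd rfl hxy
        · exact h
      have : 0 < zs.countP p := List.countP_pos_iff.mpr ⟨y, hy', hpy⟩
      omega
    · rcases List.mem_cons.mp hy with rfl | hy'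
      · rw [if_pos hpy]
        have : 0 < zs.countP p := List.countP_pos_iff.mpr ⟨x, hx', hpx⟩
        omega
      · have := ih hl.2 hx' hy'
        omega

theorem pv_both_unique (a : List Int) (k1 k2 : Nat) (h1 : k1 < a.length) (h2 : k2 < a.length)
    (hb1 : PfP a k1 ∧ SfP a k1) (hb2 : PfP a k2 ∧ SfP a k2) : k1 = k2 := by
  rcases lt_trichotomy k1 k2 with h | h | h
  · have ha := hb1.2 k2 h2 h
    have hb := hb2.1 k1 h
    omega
  · exact h
  · have ha := hb2.2 k1 h1 h
    have hb := hb1.1 k2 h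
    omega

-- the overlap of the two strict scans is 1 iff the minimum is unique
theorem pv_overlap (a : List Int) (ha : a ≠ []) :
    (List.range a.length).countP (fun k => decide (PfP a k ∧ SfP a k))
      = if PySem.List.count a ((PySem.List.min? a (fun y => y)).getD 0) = 1 then 1 else 0 := by
  obtain ⟨m0, hm⟩ : ∃ m0, PySem.List.min? a (fun y => y) = some m0 := by
    cases h : PySem.List.min? a (fun y => y) with
    | none => exact absurd ((PySem.List.min?_eq_none_iff a _).mp h) ha
    | some m => exact ⟨m, rfl⟩
  have hmem : m0 ∈ a := PySem.List.min?_mem hm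
  have hmin : ∀ y ∈ a, m0 ≤ y := PySem.List.min?_isMin hm
  simp only [hm, Option.getD_some, PySem.List.count_eq]
  rw [pv_count_eq_countP_range]
  have hGmem : ∀ j, j < a.length → pvG a j ∈ a := by
    intro j hj
    rw [pvG_eq a j hj]
    exact List.getElem_mem hj
  obtain ⟨k0, hk0, hek0⟩ := List.getElem_of_mem hmem
  have hvk0 : pvG a k0 = m0 := by rw [pvG_eq a k0 hk0]; exact hek0
  by_cases hc : (List.range a.length).countP (fun j => decide (pvG a j = m0)) = 1
  · rw [if_pos hc]
    -- the minimum index is unique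
    have huniq : ∀ j, j < a.length → pvG a j = m0 → j = k0 := by
      intro j hj hvj
      by_contra hne
      have h2 : 2 ≤ (List.range a.length).countP (fun j => decide (pvG a j = m0)) :=
        pv_two_le_countP _ _ List.nodup_range j k0 (List.mem_range.mpr hj)
          (List.mem_range.mpr hk0) hne (by simp [hvj]) (by simp [hvk0])
      omega
    -- k0 satisfies both flags
    have hboth : PfP a k0 ∧ SfP a k0 := by
      constructor
      · intro j hj
        have hj' : j < a.length := by omega
        have hle := hmin _ (hGmem j hj')
        have hne : pvG a j ≠ m0 := fun he => by have := huniq j hj' he; omega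
        rw [hvk0]
        omega
      · intro j hj hkj
        have hle := hmin _ (hGmem j hj)
        have hne : pvG a j ≠ m0 := fun he => by have := huniq j hj he; omega
        rw [hvk0]
        omega
    have hge : 1 ≤ (List.range a.length).countP (fun k => decide (PfP a k ∧ SfP a k)) := by
      apply List.countP_pos_iff.mpr
      exact ⟨k0, List.mem_range.mpr hk0, decide_eq_true hboth⟩
    have hle1 : (List.range a.length).countP (fun k => decide (PfP a k ∧ SfP a k)) ≤ 1 := by
      apply pv_countP_le_one _ _ List.nodup_range
      intro x hx y hy hpx hpy
      simp only [decide_eq_true_eq] at hpx hpy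
      exact pv_both_unique a x y (List.mem_range.mp hx) (List.mem_range.mp hy) hpx hpy
    omega
  · rw [if_neg hc]
    have hge1 : 1 ≤ (List.range a.length).countP (fun j => decide (pvG a j = m0)) := by
      apply List.countP_pos_iff.mpr
      exact ⟨k0, List.mem_range.mpr hk0, decide_eq_true hvk0⟩
    obtain ⟨x, hx, y, hy, hxy, hpx, hpy⟩ := pv_exists_two (List.range a.length)
      (fun j => decide (pvG a j = m0)) List.nodup_range (by omega)
    simp only [List.mem_range] at hx hy
    simp only [decide_eq_true_eq] at hpx hpy
    rw [List.countP_eq_zero]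
    intro k hk
    simp only [List.mem_range] at hk
    simp only [decide_eq_true_eq]
    rintro ⟨hpf, hsf⟩
    -- pick a minimum index different from k
    have hpick : ∃ j, j < a.length ∧ j ≠ k ∧ pvG a j = m0 := by
      by_cases hxk : x = k
      · exact ⟨y, hy, fun he => hxy (by omega), hpy⟩
      · exact ⟨x, hx, hxk, hpx⟩
    obtain ⟨j, hj, hjk, hvj⟩ := hpick
    have hlt : pvG a k < pvG a j := by
      rcases lt_trichotomy j k with hlt | heq | hgt
      · exact hpf j hlt
      · exact absurd heq hjk
      · exact hsf j hj hgt
    have := hmin _ (hGmem k hk)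
    omega

theorem pvLtOpt_none (x : Int) : pvLtOpt x none = true := rfl

theorem pvB_value (x : Int) (xs : List Int) :
    solution_alt (x :: xs)
      = (((List.range (x :: xs).length).countP (fun k => decide (PfP (x :: xs) k)) : Nat) : Int)
        + (((List.range (x :: xs).length).countP (fun k => decide (SfP (x :: xs) k)) : Nat) : Int)
        - (((List.range (x :: xs).length).countP
            (fun k => decide (PfP (x :: xs) k ∧ SfP (x :: xs) k)) : Nat) : Int) := by
  show ((x :: xs).foldl (fun (p : Int × Option Int) y =>
        if pvLtOpt y p.2 then (p.1 + 1, some y) else p) (0, none)).1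
      + ((x :: xs).reverse.foldl (fun (p : Int × Option Int) y =>
        if pvLtOpt y p.2 then (p.1 + 1, some y) else p) (0, none)).1
      - (if PySem.List.count (x :: xs)
            ((PySem.List.min? (x :: xs) (fun y => y)).getD 0) = 1 then (1:Int) else 0) = _
  rw [pv_scan_count, pv_scan_count]
  rw [pvPf_eq_map, pvPf_eq_map]
  simp only [pvLtOpt_none, Bool.true_and]
  rw [pv_countP_map_range, pv_countP_map_range]
  have hR : (List.range (x :: xs).reverse.length).countP
        (fun k => decide (∀ j, j < k → pvG (x :: xs).reverse k < pvG (x :: xs).reverse j))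
      = (List.range (x :: xs).length).countP (fun k => decide (SfP (x :: xs) k)) := by
    simp only [List.length_reverse]
    rw [pv_countP_rev]
    apply List.countP_congr
    intro k hk
    simp only [List.mem_range] at hk
    simp only [decide_eq_true_eq]
    exact pv_pf_reverse (x :: xs) k hk
  rw [hR]
  have hL : (List.range (x :: xs).length).countP
        (fun k => decide (∀ j, j < k → pvG (x :: xs) k < pvG (x :: xs) j))
      = (List.range (x :: xs).length).countP (fun k => decide (PfP (x :: xs) k)) := by
    apply List.countP_congr
    intro k _
    rfl
  rw [hL]
  have hov : (((List.range (x :: xs).length).countP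
        (fun k => decide (PfP (x :: xs) k ∧ SfP (x :: xs) k)) : Nat) : Int)
      = (if PySem.List.count (x :: xs)
            ((PySem.List.min? (x :: xs) (fun y => y)).getD 0) = 1 then (1:Int) else 0) := by
    rw [pv_overlap (x :: xs) (by simp)]
    split_ifs <;> rfl
  rw [← hov]
  omega

theorem pv_main (a : List Int) : solution a = solution_alt a := by
  cases a with
  | nil => rfl
  | cons x xs =>
    rw [pvA_value, pvB_value]
    have hie := pv_incl_excl (List.range (x :: xs).length)
      (fun k => decide (PfP (x :: xs) k)) (fun k => decide (SfP (x :: xs) k))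
    have hor : (List.range (x :: xs).length).countP
          (fun k => decide (PfP (x :: xs) k ∨ SfP (x :: xs) k))
        = (List.range (x :: xs).length).countP
          (fun k => decide (PfP (x :: xs) k) || decide (SfP (x :: xs) k)) := by
      apply List.countP_congr
      intro k _
      simp
    have han : (List.range (x :: xs).length).countP
          (fun k => decide (PfP (x :: xs) k ∧ SfP (x :: xs) k))
        = (List.range (x :: xs).length).countP
          (fun k => decide (PfP (x :: xs) k) && decide (SfP (x :: xs) k)) := by
      apply List.countP_congr
      intro k _
      simp
    rw [hor, han]
    omega

-- ===== VERDICT (by name: the statement is the Claim_ definition above) =====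
theorem solution_spec : Claim_equal_solution := by
  intro a _
  unfold Spec_solution
  exact pv_main a
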